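-- pv_equiv track=rewrite | github.com/blueOctopusAI/adsb-decode | src/icao.py | is_military
-- ===== SOURCE A (Python) =====
-- _US_MILITARY_START = 0xADF7C8
--
-- _US_MILITARY_END = 0xAFFFFF
--
-- _MILITARY_CALLSIGNS = frozenset({
--     "RCH",    # Reach (USAF tanker/transport)
--     "DUKE",   # US Army
--     "DOOM",   # USAF fighter
--     "JAKE",   # USN
--     "TOPCAT", # USMC
--     "REACH",  # USAF
--     "EVAC",   # Aeromedical
--     "TEAL",   # US Special Ops
--     "SPAR",   # Air Force special air mission
--     "SAM",    # Special Air Mission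
--     "EXEC",   # Executive transport
--     "CRZR",   # USAF Cruiser
--     "MOOSE",  # Canadian military
--     "CANAF",  # Canadian Forces
--     "ASCOT",  # Royal Air Force
--     "RAFR",   # RAF Reserve
--     "GAF",    # German Air Force
--     "URAN",   # Russian military
--     "CNV",    # French Navy
--     "FAF",    # French Air Force
--     "IAM",    # Italian Air Force
--     "SUI",    # Swiss Air Force
-- })
--
-- def is_military(icao_hex: str, callsign: str | None = None) -> bool:
--     """Check if an aircraft is military.
--
--     Two detection methods:
--     1. ICAO address in a military allocation block (currently US military)
--     2. Callsign matches known military patterns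
--     """
--     addr = int(icao_hex, 16)
--
--     # US military address block
--     if _US_MILITARY_START <= addr <= _US_MILITARY_END:
--         return True
--
--     # Military callsign check
--     if callsign:
--         cs = callsign.strip().upper()
--         for prefix in _MILITARY_CALLSIGNS:
--             if cs.startswith(prefix):
--                 return True
--
--     return False
-- ===== SOURCE B (Python) =====
-- _US_MILITARY_START = 0xADF7C8
--
-- _US_MILITARY_END = 0xAFFFFF
--
-- _MILITARY_CALLSIGNS = frozenset({
--     "RCH", "DUKE", "DOOM", "JAKE", "TOPCAT", "REACH", "EVAC", "TEAL",
--     "SPAR", "SAM", "EXEC", "CRZR", "MOOSE", "CANAF", "ASCOT", "RAFR",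
--     "GAF", "URAN", "CNV", "FAF", "IAM", "SUI",
-- })
--
-- _MAXLEN = 6  # max(len(p) for p in _MILITARY_CALLSIGNS)
--
--
-- def _mil_callsign(cs):
--     """Grow a prefix of cs one character at a time, doing a set lookup at
--     each step; stop once it exceeds the longest stored prefix."""
--     prefix = ""
--     for ch in cs:
--         prefix += ch
--         if len(prefix) > _MAXLEN:
--             return False
--         if prefix in _MILITARY_CALLSIGNS:
--             return True
--     return False
--
--
-- def is_military(icao_hex, callsign=None):
--     addr = int(icao_hex, 16)
--     in_block = _US_MILITARY_START <= addr <= _US_MILITARY_END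
--     return in_block or (bool(callsign) and _mil_callsign(callsign.strip().upper()))
-- ===== Notes on version B (the rewrite author's own statement) =====
-- stated objective: alternative
-- what changed: Replaces the scan of all 22 stored prefixes with startswith by an incremental walk over the callsign itself: the prefix is grown one character at a time (capped at the longest stored prefix, 6) and each step is a single set-membership lookup, with the two detection methods combined as one boolean expression instead of early returns.
import Mathlib
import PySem

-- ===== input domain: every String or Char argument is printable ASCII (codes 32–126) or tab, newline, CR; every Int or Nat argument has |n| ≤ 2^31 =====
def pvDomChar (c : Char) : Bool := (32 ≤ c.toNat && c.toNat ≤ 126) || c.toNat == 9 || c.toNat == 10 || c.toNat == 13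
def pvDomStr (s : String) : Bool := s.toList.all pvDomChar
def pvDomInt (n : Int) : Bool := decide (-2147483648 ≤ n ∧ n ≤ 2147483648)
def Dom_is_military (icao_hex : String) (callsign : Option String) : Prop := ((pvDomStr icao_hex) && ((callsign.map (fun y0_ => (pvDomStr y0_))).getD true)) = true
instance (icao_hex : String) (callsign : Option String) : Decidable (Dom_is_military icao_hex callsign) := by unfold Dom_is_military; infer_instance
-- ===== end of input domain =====

-- B replaces the scan of all stored prefixes with startswith by an incremental walk over the
-- callsign: the prefix grows one character at a time (capped at 6) with a set lookup per step (alternative).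


-- ===== PORT A =====
-- _MILITARY_CALLSIGNS (shared constant data of the module, in source order)
def milList : List String :=
  ["RCH", "DUKE", "DOOM", "JAKE", "TOPCAT", "REACH", "EVAC", "TEAL",
   "SPAR", "SAM", "EXEC", "CRZR", "MOOSE", "CANAF", "ASCOT", "RAFR",
   "GAF", "URAN", "CNV", "FAF", "IAM", "SUI"]

def is_military (icao_hex : String) (callsign : Option String) : Bool :=
  match PySem.Int.ofStrBase? icao_hex 16 with
  | none => false  -- int(icao_hex, 16) raises ValueError here; excluded by Pre_
  | some addr =>
    if 0xADF7C8 ≤ addr ∧ addr ≤ 0xAFFFFF then true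
    else
      match callsign with
      | none => false
      | some c =>
        if c = "" then false  -- `if callsign:` — empty string is falsy
        else
          let cs := PySem.Str.upper (PySem.Str.strip c)
          milList.any (fun p => PySem.Str.startswith cs p)

-- ===== PORT B =====
-- _mil_callsign: grow the prefix one character at a time, set lookup per step, cap at 6
def milWalk : List Char → List Char → Bool
  | _, [] => false
  | acc, ch :: rest =>
    let acc' := acc ++ [ch]
    if 6 < acc'.length then false
    else milList.contains (String.ofList acc') || milWalk acc' rest

def mil_callsign (cs : String) : Bool := milWalk [] cs.toList

def is_military_alt (icao_hex : String) (callsign : Option String) : Bool :=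
  match PySem.Int.ofStrBase? icao_hex 16 with
  | none => false  -- int(icao_hex, 16) raises ValueError here; excluded by Pre_
  | some addr =>
    let in_block := decide (0xADF7C8 ≤ addr) && decide (addr ≤ 0xAFFFFF)
    in_block || ((callsign.getD "" != "")
                  && mil_callsign (PySem.Str.upper (PySem.Str.strip (callsign.getD ""))))

-- ===== PRECONDITION & SPEC =====
-- Pre_ excludes exactly the inputs where int(icao_hex, 16) raises ValueError
def Pre_is_military (icao_hex : String) (callsign : Option String) : Prop :=
  (PySem.Int.ofStrBase? icao_hex 16).isSome = true
instance (icao_hex : String) (callsign : Option String) : Decidable (Pre_is_military icao_hex callsign) := by unfold Pre_is_military; infer_instance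

def pvWitness_is_military : String × Option String := ("ADF7C8", some " rch123 ")

def Spec_is_military (icao_hex : String) (callsign : Option String) (out : Bool) : Prop := out = is_military_alt icao_hex callsign
instance (icao_hex : String) (callsign : Option String) (out : Bool) : Decidable (Spec_is_military icao_hex callsign out) := by unfold Spec_is_military; infer_instance

-- ===== CLAIM =====
def Claim_equal_is_military : Prop := ∀ (icao_hex : String) (callsign : Option String), Dom_is_military icao_hex callsign → Pre_is_military icao_hex callsign → Spec_is_military icao_hex callsign (is_military icao_hex callsign)

-- ===== LEMMAS AND PROOFS =====

-- every stored prefix has length between 1 and 6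
lemma milList_len (p : String) (hp : p ∈ milList) :
    1 ≤ p.toList.length ∧ p.toList.length ≤ 6 := by
  fin_cases hp <;> decide

-- characterization of the walk: it finds exactly the nonempty prefixes of l (extended from acc)
-- of total length ≤ 6 that lie in milList
lemma milWalk_iff (l acc : List Char) :
    milWalk acc l = true ↔
      ∃ k, 1 ≤ k ∧ k ≤ l.length ∧ (acc ++ l.take k).length ≤ 6 ∧
        String.ofList (acc ++ l.take k) ∈ milList := by
  induction l generalizing acc with
  | nil => simp [milWalk]
  | cons ch rest ih =>
    simp only [milWalk]
    by_cases hlen : 6 < (acc ++ [ch]).length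
    · rw [if_pos hlen]
      simp only [Bool.false_eq_true, false_iff]
      rintro ⟨k, hk1, _, hk6, _⟩
      have : 1 ≤ ((ch :: rest).take k).length := by
        simp [List.length_take]; omega
      simp [List.length_append] at hlen hk6
      simp [List.length_take] at this hk6
      omega
    · simp only [if_neg hlen, Bool.or_eq_true, ih]
      constructor
      · rintro (hc | ⟨k, hk1, hkl, hk6, hmem⟩)
        · refine ⟨1, le_refl _, by simp, ?_, ?_⟩
          · simpa [List.length_append] using le_of_not_gt hlen
          · simpa using (by simpa using hc : String.ofList (acc ++ [ch]) ∈ milList)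
        · refine ⟨k + 1, by omega, by simpa using hkl, ?_, ?_⟩
          · simpa [List.take_succ_cons, List.append_assoc] using hk6
          · simpa [List.take_succ_cons, List.append_assoc] using hmem
      · rintro ⟨k, hk1, hkl, hk6, hmem⟩
        match k, hk1 with
        | 1, _ =>
          left
          simpa using hmem
        | (k' + 2), _ =>
          right
          refine ⟨k' + 1, by omega, by simpa using hkl, ?_, ?_⟩
          · simpa [List.take_succ_cons, List.append_assoc] using hk6
          · simpa [List.take_succ_cons, List.append_assoc] using hmem

-- the core equivalence of the two callsign checks
lemma any_startswith_eq_walk (cs : String) :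
    (milList.any (fun p => PySem.Str.startswith cs p)) = mil_callsign cs := by
  rw [Bool.eq_iff_iff, List.any_eq_true]
  unfold mil_callsign
  rw [milWalk_iff]
  simp only [List.nil_append]
  constructor
  · rintro ⟨p, hp, hs⟩
    have hpre : p.toList <+: cs.toList := by
      rw [PySem.Str.startswith_eq] at hs
      exact (PySem.Chars.startswith_iff _ _).mp hs
    have htake : cs.toList.take p.toList.length = p.toList :=
      (List.prefix_iff_eq_take.mp hpre).symm
    obtain ⟨h1, h6⟩ := milList_len p hp
    refine ⟨p.toList.length, h1, hpre.length_le, ?_, ?_⟩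
    · rw [htake]; exact h6
    · rw [htake]; simpa using hp
  · rintro ⟨k, _, _, _, hmem⟩
    refine ⟨String.ofList (cs.toList.take k), hmem, ?_⟩
    rw [PySem.Str.startswith_eq]
    apply (PySem.Chars.startswith_iff _ _).mpr
    simpa using List.take_prefix k cs.toList

-- ===== VERDICT =====
theorem is_military_spec : Claim_equal_is_military := by
  intro icao_hex callsign _ _
  unfold Spec_is_military is_military is_military_alt
  cases PySem.Int.ofStrBase? icao_hex 16 with
  | none => rfl
  | some addr =>
    simp only
    by_cases hrange : 0xADF7C8 ≤ addr ∧ addr ≤ 0xAFFFFF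
    · simp [hrange]
    · rw [if_neg hrange]
      have hblk : (decide (0xADF7C8 ≤ addr) && decide (addr ≤ 0xAFFFFF)) = false := by
        rcases not_and_or.mp hrange with h | h <;> simp [h]
      rw [hblk, Bool.false_or]
      cases callsign with
      | none => simp
      | some c =>
        simp only [Option.getD_some]
        by_cases hc : c = ""
        · simp [hc]
        · rw [if_neg hc]
          have : (c != "") = true := by simpa using hc
          rw [this, Bool.true_and]
          exact any_startswith_eq_walk _
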